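-- pv_equiv track=rewrite | github.com/bigfrog10/python-data-structure-algo-tutorial | leetcode/src/companies/hudson_river_trading/consonant_vowel/cv_imbalance_recursion.py | imbalance
-- ===== SOURCE A (Python) =====
-- def imbalance(string: str) -> int:
--     vowels = {'a', 'e', 'i', 'o', 'u'}
--
--     def dfs(s):
--         if not s:  # base cases
--             return 0
--
--         if len(s) == 1:
--             return 1
--
--         # if we want to remove this loop, we need to track begin/end of s.
--         # then use above cumulative sum
--         count = 0
--         for c in s:
--             if c in vowels:
--                 count += 1
--
--         n = len(s)
--         # count: vowels, n - count: consonants, so diff = n-count - count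
--         res = abs(n - count - count) + dfs(s[:n // 2]) + dfs(s[n // 2:])
--         return res
--
--     return dfs(string)
-- ===== SOURCE B (Python) =====
-- def imbalance(string: str) -> int:
--     vowels = set('aeiou')
--     pref = [0]
--     acc = 0
--     for c in string:
--         acc += c in vowels
--         pref.append(acc)
--
--     def go(lo, hi):
--         n = hi - lo
--         if n <= 1:
--             return n
--         v = pref[hi] - pref[lo]
--         m = lo + n // 2
--         return abs(n - 2 * v) + go(lo, m) + go(m, hi)
--
--     return go(0, len(string))
-- ===== Notes on version B (the rewrite author's own statement) =====
-- stated objective: faster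
-- what changed: replace per-node substring slicing and vowel re-counting with a single prefix-sum pass plus recursion over index ranges, making each recursion node O(1)
import Mathlib
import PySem

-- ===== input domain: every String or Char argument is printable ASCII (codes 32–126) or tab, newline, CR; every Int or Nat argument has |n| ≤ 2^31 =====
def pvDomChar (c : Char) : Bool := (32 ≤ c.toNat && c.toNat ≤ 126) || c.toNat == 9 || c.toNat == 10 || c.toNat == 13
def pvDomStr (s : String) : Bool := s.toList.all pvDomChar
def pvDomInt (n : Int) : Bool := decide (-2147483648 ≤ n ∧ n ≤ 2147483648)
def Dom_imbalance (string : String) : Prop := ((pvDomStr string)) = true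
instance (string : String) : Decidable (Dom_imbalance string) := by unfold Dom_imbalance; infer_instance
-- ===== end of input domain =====

-- B replaces A's per-node slicing and vowel re-counting by one prefix-sum pass plus
-- recursion over index ranges (objective: faster, O(n) nodes each O(1) vs O(n log n)).

-- ===== PORT A =====
-- `c in vowels` for the literal set {'a','e','i','o','u'}
def pvVowel (c : Char) : Bool := c == 'a' || c == 'e' || c == 'i' || c == 'o' || c == 'u'

-- A's inner dfs; s[:n//2] / s[n//2:] with n = len(s) ≥ 0 are exactly take (n/2) / drop (n/2)
def pvDfsA (s : List Char) : Int :=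
  if h1 : s = [] then 0
  else if h2 : s.length = 1 then 1
  else
    let count := s.foldl (fun acc c => if pvVowel c then acc + 1 else acc) (0 : Int)
    let n := s.length
    |(n : Int) - count - count| + pvDfsA (s.take (n / 2)) + pvDfsA (s.drop (n / 2))
termination_by s.length
decreasing_by
  · have h0 : s.length ≠ 0 := fun hc => h1 (List.eq_nil_of_length_eq_zero hc)
    simp [List.length_take]; omega
  · have h0 : s.length ≠ 0 := fun hc => h1 (List.eq_nil_of_length_eq_zero hc)
    simp; omega

def imbalance (string : String) : Int := pvDfsA string.toList

-- ===== PORT B =====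
-- the prefix loop: state is (pref, acc)
def pvPrefStep (st : List Int × Int) (c : Char) : List Int × Int :=
  let acc := st.2 + (if pvVowel c then 1 else 0)
  (st.1 ++ [acc], acc)

def pvPref (s : List Char) : List Int := (s.foldl pvPrefStep ([0], 0)).1

-- B's go(lo, hi); pref[hi] / pref[lo] are in range on every call, ported as getD _ 0
def pvGo (P : List Int) (lo hi : Nat) : Int :=
  let n := hi - lo
  if _h : n ≤ 1 then (n : Int)
  else
    let v := P.getD hi 0 - P.getD lo 0
    let m := lo + n / 2
    |(n : Int) - 2 * v| + pvGo P lo m + pvGo P m hi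
termination_by hi - lo
decreasing_by all_goals omega

def imbalance_alt (string : String) : Int :=
  pvGo (pvPref string.toList) 0 string.toList.length

-- ===== PRECONDITION & SPEC =====
def Spec_imbalance (string : String) (out : Int) : Prop := out = imbalance_alt string
instance (string : String) (out : Int) : Decidable (Spec_imbalance string out) := by unfold Spec_imbalance; infer_instance

-- ===== CLAIM (what is proved, stated in full; the proofs are below) =====
def Claim_equal_imbalance : Prop := ∀ (string : String), Dom_imbalance string → Spec_imbalance string (imbalance string)

-- ===== LEMMAS AND PROOFS =====

-- spec of the prefix loop body: the list of running vowel counts of s starting from acc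
def pvPrefs (s : List Char) (acc : Int) : List Int :=
  match s with
  | [] => []
  | c :: t => let a := acc + (if pvVowel c then 1 else 0); a :: pvPrefs t a

theorem pvPref_foldl (s : List Char) : ∀ (P : List Int) (acc : Int),
    (s.foldl pvPrefStep (P, acc)).1 = P ++ pvPrefs s acc := by
  induction s with
  | nil => intro P acc; simp [pvPrefs]
  | cons c t ih => intro P acc; simp [pvPrefStep, pvPrefs, ih]

theorem pvPrefs_getD (s : List Char) : ∀ (acc : Int) (k : Nat), k < s.length →
    (pvPrefs s acc).getD k 0 = acc + ((s.take (k+1)).countP pvVowel : Int) := by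
  induction s with
  | nil => intro acc k h; simp at h
  | cons c t ih =>
    intro acc k h
    cases k with
    | zero =>
      simp only [pvPrefs, List.getD_cons_zero, List.take_succ_cons, List.take_zero,
        List.countP_cons, List.countP_nil]
      split_ifs <;> simp
    | succ k =>
      simp only [pvPrefs, List.getD_cons_succ, List.take_succ_cons, List.countP_cons]
      rw [ih _ k (by simpa using h)]
      split_ifs <;> push_cast <;> ring

theorem pvPref_getD (s : List Char) (k : Nat) (hk : k ≤ s.length) :
    (pvPref s).getD k 0 = ((s.take k).countP pvVowel : Int) := by
  have h0 : pvPref s = 0 :: pvPrefs s 0 := by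
    simp [pvPref, pvPref_foldl s [0] 0]
  cases k with
  | zero => simp [h0]
  | succ k =>
    rw [h0]
    simp only [List.getD_cons_succ]
    rw [pvPrefs_getD s 0 k (by omega)]
    ring

theorem pvCount_foldl (s : List Char) : ∀ (a : Int),
    s.foldl (fun acc c => if pvVowel c then acc + 1 else acc) a
      = a + (s.countP pvVowel : Int) := by
  induction s with
  | nil => intro a; simp
  | cons c t ih =>
    intro a
    simp only [List.foldl_cons, List.countP_cons, ih]
    split_ifs <;> push_cast <;> ring

theorem pvCount_seg (s : List Char) (lo hi : Nat) (h1 : lo ≤ hi) :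
    ((s.take hi).countP pvVowel : Int) - ((s.take lo).countP pvVowel : Int)
      = (((s.drop lo).take (hi - lo)).countP pvVowel : Int) := by
  have h : s.take hi = s.take lo ++ (s.drop lo).take (hi - lo) := by
    rw [← List.take_add]; congr 1; omega
  rw [h, List.countP_append]; push_cast; ring

theorem pvGo_eq (s : List Char) : ∀ (k lo hi : Nat), hi - lo ≤ k → lo ≤ hi → hi ≤ s.length →
    pvGo (pvPref s) lo hi = pvDfsA ((s.drop lo).take (hi - lo)) := by
  intro k
  induction k with
  | zero =>
    intro lo hi hk h1 h2
    have : hi = lo := by omega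
    subst this
    rw [pvGo, pvDfsA]
    simp
  | succ k ih =>
    intro lo hi hk h1 h2
    set sub := (s.drop lo).take (hi - lo) with hsub
    have hlen : sub.length = hi - lo := by
      simp [hsub]; omega
    by_cases hle : hi - lo ≤ 1
    · rw [pvGo]
      simp only [hle, dif_pos]
      rcases Nat.lt_or_ge (hi - lo) 1 with h | h
      · have h0 : hi - lo = 0 := by omega
        have : sub = [] := List.eq_nil_of_length_eq_zero (by omega)
        rw [this, pvDfsA]; simp [h0]
      · have h1' : hi - lo = 1 := by omega
        have hne : sub ≠ [] := by
          intro hc; rw [hc] at hlen; simp at hlen; omega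
        rw [pvDfsA]
        simp [hne, hlen, h1']
    · -- n ≥ 2
      have hn2 : 2 ≤ hi - lo := by omega
      have hne : sub ≠ [] := by
        intro hc; rw [hc] at hlen; simp at hlen; omega
      have hl1 : ¬ sub.length = 1 := by omega
      rw [pvGo, pvDfsA]
      simp only [hle, dif_neg, not_false_iff, hne, hl1]
      rw [pvCount_foldl sub 0, pvPref_getD s hi h2, pvPref_getD s lo (by omega),
          pvCount_seg s lo hi h1, ← hsub]
      have htake : sub.take (sub.length / 2) = (s.drop lo).take ((hi - lo) / 2) := by
        rw [hlen, hsub, List.take_take]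
        congr 1; omega
      have hdrop : sub.drop (sub.length / 2)
          = (s.drop (lo + (hi - lo) / 2)).take (hi - (lo + (hi - lo) / 2)) := by
        rw [hlen, hsub, List.drop_take, List.drop_drop]
        congr 1
        omega
      rw [htake, hdrop]
      rw [ih lo (lo + (hi - lo) / 2) (by omega) (by omega) (by omega),
          ih (lo + (hi - lo) / 2) hi (by omega) (by omega) h2]
      rw [show (lo + (hi - lo) / 2) - lo = (hi - lo) / 2 by omega]
      rw [hlen]
      have habs : (((hi - lo : Nat) : Int) - 2 * (sub.countP pvVowel : Int))
          = ((hi - lo : Nat) : Int) - (0 + (sub.countP pvVowel : Int)) - (0 + (sub.countP pvVowel : Int)) := by ring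
      rw [habs]

-- ===== VERDICT (by name: the statement is the Claim_ definition above) =====
theorem imbalance_spec : Claim_equal_imbalance := by
  intro string _
  unfold Spec_imbalance imbalance imbalance_alt
  rw [pvGo_eq string.toList string.toList.length 0 string.toList.length (by omega) (by omega) (by omega)]
  rw [List.drop_zero, Nat.sub_zero, List.take_length]
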